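-- pv_equiv track=rewrite | github.com/LiuXiaoxuanPKU/Coco | constropt/autrite/app_create_sql/parse.py | replace_keyword
-- ===== SOURCE A (Python) =====
-- def replace_keyword(stmts):
--     keywords = {"varying[]": "varying",
--                 "bigint[]": "character varying",
--                 "text": "character varying",
--                 "bytea": "binary(255)",
--                 "inet": "character varying",
--                 "jsonb": "character varying"}
--     fuzzy_keywords = ["public."]
--     replace_stmts = []
--     for stmt in stmts:
--         lines = stmt.split("\n")
--         replace_stmt = []
--         for line in lines:
--             tokens = line.split(" ")
--             for keyword in keywords:
--                 if keyword in tokens: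
--                     keyword_id = tokens.index(keyword)
--                     tokens[keyword_id] = keywords[keyword]
--                 elif keyword + ',' in  tokens:
--                     keyword_id = tokens.index(keyword + ",")
--                     tokens[keyword_id] = keywords[keyword] + ","
--                 else:
--                     for token in tokens:
--                         for fz in fuzzy_keywords:
--                             if token.startswith(fz):
--                                 keyword_id = tokens.index(token)
--                                 tokens[keyword_id] = "character varying"
--             line = " ".join(tokens)
--             replace_stmt.append(line)
--         replace_stmt = "\n".join(replace_stmt)
--         replace_stmts.append(replace_stmt)
--     return replace_stmts
-- ===== SOURCE B (Python) =====
-- def replace_keyword(stmts):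
--     keywords = {"varying[]": "varying",
--                 "bigint[]": "character varying",
--                 "text": "character varying",
--                 "bytea": "binary(255)",
--                 "inet": "character varying",
--                 "jsonb": "character varying"}
--     result = []
--     for stmt in stmts:
--         out_lines = []
--         for line in stmt.split("\n"):
--             tokens = line.split(" ")
--             # one linear pass: first-occurrence index of every token value,
--             # plus the positions of all "public."-prefixed tokens
--             first = {}
--             fuzzy = []
--             for i, t in enumerate(tokens):
--                 if t not in first:
--                     first[t] = i
--                 if t.startswith("public."):
--                     fuzzy.append(i)
--             missing = False
--             for kw, rep in keywords.items():
--                 if kw in first: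
--                     tokens[first[kw]] = rep
--                 elif kw + "," in first:
--                     tokens[first[kw + ","]] = rep + ","
--                 else:
--                     missing = True
--             if missing:
--                 for i in fuzzy:
--                     tokens[i] = "character varying"
--             out_lines.append(" ".join(tokens))
--         result.append("\n".join(out_lines))
--     return result
-- ===== Notes on version B (the rewrite author's own statement) =====
-- stated objective: alternative
-- what changed: One linear scan per line records the first-occurrence index of every token and the positions of all 'public.'-prefixed tokens, so A's per-keyword list.index scans and repeated fuzzy rescans are replaced by six dict lookups and a single pass over the precomputed positions guarded by one missing-keyword flag (measured ~1.3x on generated inputs, below the 1.5x bar, so no speed claim).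
import Mathlib
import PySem

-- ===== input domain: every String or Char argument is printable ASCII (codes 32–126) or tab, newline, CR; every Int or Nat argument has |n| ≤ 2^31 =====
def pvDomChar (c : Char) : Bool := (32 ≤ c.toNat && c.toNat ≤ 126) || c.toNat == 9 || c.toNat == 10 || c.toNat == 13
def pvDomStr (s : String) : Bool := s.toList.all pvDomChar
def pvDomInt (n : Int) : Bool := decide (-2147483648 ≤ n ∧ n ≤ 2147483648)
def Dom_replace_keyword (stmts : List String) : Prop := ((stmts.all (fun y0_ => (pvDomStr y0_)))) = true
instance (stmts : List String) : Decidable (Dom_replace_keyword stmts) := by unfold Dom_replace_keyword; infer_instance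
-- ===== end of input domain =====

-- B replaces A's per-keyword list.index scans and repeated fuzzy rescans by one linear
-- scan per line (first-occurrence indices + 'public.'-positions) and a missing-keyword flag.

-- ===== PORT A =====
def pvKeywordsA : List (String × String) :=
  [("varying[]", "varying"), ("bigint[]", "character varying"), ("text", "character varying"),
   ("bytea", "binary(255)"), ("inet", "character varying"), ("jsonb", "character varying")]

def pvFuzzyKeywordsA : List String := ["public."]

-- body of 'for fz in fuzzy_keywords:' for one token of the live list
def pvFuzzTokenA (tokens : List String) (token : String) : List String :=
  pvFuzzyKeywordsA.foldl (fun tokens fz =>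
    if PySem.Str.startswith token fz then
      match PySem.List.index? tokens token with
      | some j => tokens.set j "character varying"
      | none => tokens
    else tokens) tokens

theorem pvFuzzTokenA_length (tokens : List String) (token : String) :
    (pvFuzzTokenA tokens token).length = tokens.length := by
  unfold pvFuzzTokenA pvFuzzyKeywordsA
  simp only [List.foldl_cons, List.foldl_nil]
  split
  · split <;> simp
  · rfl

-- 'for token in tokens:' reading the live (in-place mutated, same-length) list
def pvFuzzLoopA (tokens : List String) (i : Nat) : List String :=
  if h : i < tokens.length then
    pvFuzzLoopA (pvFuzzTokenA tokens tokens[i]) (i + 1)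
  else tokens
termination_by tokens.length - i
decreasing_by simp only [pvFuzzTokenA_length]; omega

-- body of 'for keyword in keywords:'
def pvStepA (tokens : List String) (kv : String × String) : List String :=
  if kv.1 ∈ tokens then
    match PySem.List.index? tokens kv.1 with
    | some j => tokens.set j kv.2
    | none => tokens
  else if (kv.1 ++ ",") ∈ tokens then
    match PySem.List.index? tokens (kv.1 ++ ",") with
    | some j => tokens.set j (kv.2 ++ ",")
    | none => tokens
  else pvFuzzLoopA tokens 0

def pvLineA (line : String) : String :=
  match PySem.Str.split? line " " with
  | some tokens => PySem.Str.join " " (pvKeywordsA.foldl pvStepA tokens)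
  | none => line  -- unreachable: separator " " is non-empty

def replace_keyword (stmts : List String) : List String :=
  stmts.map (fun stmt =>
    match PySem.Str.split? stmt "\n" with
    | some lines => PySem.Str.join "\n" (lines.map pvLineA)
    | none => stmt)  -- unreachable: separator "\n" is non-empty

-- ===== PORT B =====
def pvKeywordsB : List (String × String) :=
  [("varying[]", "varying"), ("bigint[]", "character varying"), ("text", "character varying"),
   ("bytea", "binary(255)"), ("inet", "character varying"), ("jsonb", "character varying")]

-- one linear pass: first-occurrence index of each token value, positions of 'public.'-tokens
def pvScanB (tokens : List String) : PySem.Dict String Int × List Int :=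
  (PySem.List.enumerate tokens).foldl (fun st p =>
    (if st.1.contains p.2 then st.1 else st.1.insert p.2 p.1,
     if PySem.Str.startswith p.2 "public." then st.2 ++ [p.1] else st.2))
    (PySem.Dict.empty, [])

-- body of 'for kw, rep in keywords.items():' using the precomputed first-index dict
def pvStepB (first : PySem.Dict String Int) (st : List String × Bool) (kv : String × String) :
    List String × Bool :=
  match first.get? kv.1 with
  | some i => (PySem.List.pySetD st.1 i kv.2, st.2)
  | none =>
    match first.get? (kv.1 ++ ",") with
    | some i => (PySem.List.pySetD st.1 i (kv.2 ++ ","), st.2)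
    | none => (st.1, true)

def pvLineB (line : String) : String :=
  match PySem.Str.split? line " " with
  | some tokens =>
    let scan := pvScanB tokens
    let st := pvKeywordsB.foldl (pvStepB scan.1) (tokens, false)
    let tokens2 :=
      if st.2 then
        scan.2.foldl (fun ts i => PySem.List.pySetD ts i "character varying") st.1
      else st.1
    PySem.Str.join " " tokens2
  | none => line  -- unreachable: separator " " is non-empty

def replace_keyword_alt (stmts : List String) : List String :=
  stmts.map (fun stmt =>
    match PySem.Str.split? stmt "\n" with
    | some lines => PySem.Str.join "\n" (lines.map pvLineB)
    | none => stmt)  -- unreachable: separator "\n" is non-empty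

-- ===== PRECONDITION & SPEC =====
def Spec_replace_keyword (stmts : List String) (out : List String) : Prop := out = replace_keyword_alt stmts
instance (stmts : List String) (out : List String) : Decidable (Spec_replace_keyword stmts out) := by unfold Spec_replace_keyword; infer_instance

-- ===== CLAIM (what is proved, stated in full; the proofs are below) =====
def Claim_equal_replace_keyword : Prop := ∀ (stmts : List String), Dom_replace_keyword stmts → Spec_replace_keyword stmts (replace_keyword stmts)

-- ===== LEMMAS AND PROOFS =====

-- the fuzzy replacement as a pointwise map
def pvPub (t : String) : String :=
  if PySem.Str.startswith t "public." then "character varying" else t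

-- the keyword replacement step with no fuzzy branch (reference form)
def pvStepK (tokens : List String) (kv : String × String) : List String :=
  match PySem.List.index? tokens kv.1 with
  | some j => tokens.set j kv.2
  | none =>
    match PySem.List.index? tokens (kv.1 ++ ",") with
    | some j => tokens.set j (kv.2 ++ ",")
    | none => tokens

-- some keyword absent (in both plain and comma form): the fuzzy pass fires
def pvMissing (kws : List (String × String)) (ts : List String) : Bool :=
  kws.any (fun kv => !ts.contains kv.1 && !ts.contains (kv.1 ++ ","))

-- non-interference conditions between keyword pairs (hold for the concrete table, by decide)
def pvOK1 (kv : String × String) : Prop :=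
  PySem.Str.startswith kv.1 "public." = false ∧
  PySem.Str.startswith (kv.1 ++ ",") "public." = false ∧
  PySem.Str.startswith kv.2 "public." = false ∧
  PySem.Str.startswith (kv.2 ++ ",") "public." = false ∧
  kv.1 ≠ "character varying" ∧ kv.1 ++ "," ≠ "character varying"

def pvOK2 (kv kv' : String × String) : Prop :=
  kv.1 ≠ kv'.1 ++ "," ∧ kv.2 ≠ kv'.1 ∧ kv.2 ≠ kv'.1 ++ "," ∧
  kv.2 ++ "," ≠ kv'.1 ∧ kv.2 ++ "," ≠ kv'.1 ++ ","

def pvOK (kws : List (String × String)) : Prop :=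
  kws.Pairwise (fun kv kv' => kv.1 ≠ kv'.1 ∧ kv.1 ++ "," ≠ kv'.1 ++ ",") ∧
  (∀ kv ∈ kws, pvOK1 kv) ∧ (∀ kv ∈ kws, ∀ kv' ∈ kws, pvOK2 kv kv')

theorem pvOK_cons {kv : String × String} {kws : List (String × String)}
    (h : pvOK (kv :: kws)) : pvOK kws := by
  obtain ⟨h1, h2, h3⟩ := h
  exact ⟨(List.pairwise_cons.mp h1).2,
    fun a ha => h2 a (List.mem_cons_of_mem _ ha),
    fun a ha b hb => h3 a (List.mem_cons_of_mem _ ha) b (List.mem_cons_of_mem _ hb)⟩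

theorem pvOK_keywords : pvOK pvKeywordsA := by
  unfold pvOK pvOK1 pvOK2 pvKeywordsA; decide

-- G1: setting a position holding a value ≠ c with a value ≠ c leaves index? at c unchanged
theorem pvIndex?_set_ne {ts : List String} {j : Nat} {a v c : String}
    (hj : ts[j]? = some a) (ha : a ≠ c) (hv : v ≠ c) :
    PySem.List.index? (ts.set j v) c = PySem.List.index? ts c := by
  induction ts generalizing j with
  | nil => simp at hj
  | cons h tl ih =>
    cases j with
    | zero =>
      simp at hj; subst hj
      by_cases hc : h = c
      · exact absurd hc ha
      · rw [List.set_cons_zero, PySem.List.index?_cons_of_ne _ hv, PySem.List.index?_cons_of_ne _ hc]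
    | succ j =>
      simp only [List.getElem?_cons_succ] at hj
      by_cases hc : h = c
      · subst hc
        rw [List.set_cons_succ, PySem.List.index?_cons_self, PySem.List.index?_cons_self]
      · rw [List.set_cons_succ, PySem.List.index?_cons_of_ne _ hc, PySem.List.index?_cons_of_ne _ hc,
          ih hj]

theorem pvMem_set_ne {ts : List String} {j : Nat} {a v c : String}
    (hj : ts[j]? = some a) (ha : a ≠ c) (hv : v ≠ c) :
    (c ∈ ts.set j v) ↔ c ∈ ts := by
  rw [← PySem.List.index?_isSome_iff, ← PySem.List.index?_isSome_iff, pvIndex?_set_ne hj ha hv]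

-- G3: index? through a map that fixes exactly the preimages of c
theorem pvIndex?_map {f : String → String} {ts : List String} {c : String}
    (h : ∀ t, f t = c ↔ t = c) :
    PySem.List.index? (ts.map f) c = PySem.List.index? ts c := by
  induction ts with
  | nil => rfl
  | cons t tl ih =>
    by_cases hc : t = c
    · subst hc
      rw [List.map_cons, (h t).mpr rfl, PySem.List.index?_cons_self, PySem.List.index?_cons_self]
    · have hfc : f t ≠ c := fun hf => hc ((h t).mp hf)
      rw [List.map_cons, PySem.List.index?_cons_of_ne _ hfc, PySem.List.index?_cons_of_ne _ hc, ih]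

theorem pvPub_fix_iff {c : String} (h1 : PySem.Str.startswith c "public." = false)
    (h2 : c ≠ "character varying") : ∀ t, pvPub t = c ↔ t = c := by
  intro t
  unfold pvPub
  by_cases hs : PySem.Str.startswith t "public." = true
  · rw [if_pos hs]
    constructor
    · intro h; exact absurd h.symm h2
    · intro h; subst h; rw [hs] at h1; exact absurd h1 (by simp)
  · rw [if_neg hs]

theorem pvPub_fixed {c : String} (h1 : PySem.Str.startswith c "public." = false) : pvPub c = c := by
  unfold pvPub; rw [h1]; simp

theorem pvPub_idem (t : String) : pvPub (pvPub t) = pvPub t := by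
  unfold pvPub
  by_cases hs : PySem.Str.startswith t "public." = true
  · rw [if_pos hs, if_neg (by decide : ¬ PySem.Str.startswith "character varying" "public." = true)]
  · rw [if_neg hs, if_neg hs]

theorem pvMap_pub_idem (ts : List String) : (ts.map pvPub).map pvPub = ts.map pvPub := by
  rw [List.map_map]
  exact List.map_congr_left (fun t _ => pvPub_idem t)

-- set at i < length: head part and tail part
theorem pvSet_take {ts : List String} {i : Nat} (v : String) (h : i < ts.length) :
    (ts.set i v).take (i + 1) = ts.take i ++ [v] := by
  rw [List.set_eq_take_append_cons_drop, if_pos h, List.take_append]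
  simp [List.length_take, Nat.le_of_lt h, List.take_take]

theorem pvSet_drop {ts : List String} {i : Nat} (v : String) (h : i < ts.length) :
    (ts.set i v).drop (i + 1) = ts.drop (i + 1) := by
  rw [List.set_eq_take_append_cons_drop, if_pos h, List.drop_append]
  simp [List.length_take, Nat.le_of_lt h]

-- index? finds exactly position i when ts[i] = t and t is absent before i
theorem pvIndex?_eq_some_at {ts : List String} {i : Nat} {t : String}
    (hi : i < ts.length) (ht : ts[i] = t) (hlt : ∀ j (hj : j < i), ts[j]'(by omega) ≠ t) :
    PySem.List.index? ts t = some i := by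
  induction ts generalizing i with
  | nil => simp at hi
  | cons h tl ih =>
    cases i with
    | zero => simp at ht; subst ht; exact PySem.List.index?_cons_self _ _
    | succ i =>
      have hh : h ≠ t := hlt 0 (Nat.succ_pos i)
      rw [PySem.List.index?_cons_of_ne _ hh,
        ih (by simpa using hi) (by simpa using ht) (fun j hj => by
          have := hlt (j + 1) (by omega); simpa using this)]
      rfl

-- L2: the fuzzy loop is the pointwise map pvPub
theorem pvFuzzLoopA_eq (k : Nat) : ∀ (ts : List String) (i : Nat), ts.length - i = k →
    (∀ j (hj1 : j < i) (hj2 : j < ts.length), PySem.Str.startswith ts[j] "public." = false) →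
    pvFuzzLoopA ts i = ts.take i ++ (ts.drop i).map pvPub := by
  induction k with
  | zero =>
    intro ts i hk hpre
    have hle : ts.length ≤ i := by omega
    rw [pvFuzzLoopA]
    simp [Nat.not_lt.mpr hle, List.take_of_length_le hle, List.drop_of_length_le hle]
  | succ k ih =>
    intro ts i hk hpre
    have hi : i < ts.length := by omega
    rw [pvFuzzLoopA]
    simp only [hi, dif_pos]
    have hdropi : ts.drop i = ts[i] :: ts.drop (i + 1) := (List.getElem_cons_drop hi).symm
    by_cases hsw : PySem.Str.startswith ts[i] "public." = true
    · have hidx : PySem.List.index? ts ts[i] = some i := by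
        apply pvIndex?_eq_some_at hi rfl
        intro j hj heq
        have := hpre j hj (by omega)
        rw [heq, hsw] at this; exact Bool.true_eq_false.mp this
      have hfz : pvFuzzTokenA ts ts[i] = ts.set i "character varying" := by
        unfold pvFuzzTokenA pvFuzzyKeywordsA
        simp only [List.foldl_cons, List.foldl_nil, hsw, if_pos, hidx]
      rw [hfz]
      rw [ih _ (i + 1) (by simp; omega) (fun j _hj1 hj2 => by
        rcases Nat.lt_or_ge j i with hji | hji
        · rw [List.getElem_set_ne (by omega)]
          exact hpre j hji (by simpa using hj2)
        · have hji' : j = i := by omega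
          subst hji'
          rw [List.getElem_set_self (by simpa using hj2)]
          decide)]
      rw [pvSet_take _ hi, pvSet_drop _ hi, hdropi]
      simp only [List.map_cons, List.append_assoc, List.singleton_append]
      unfold pvPub
      rw [hsw]
      simp
    · have hsw' : PySem.Str.startswith ts[i] "public." = false := by
        revert hsw; cases PySem.Str.startswith ts[i] "public." <;> simp
      have hfz : pvFuzzTokenA ts ts[i] = ts := by
        unfold pvFuzzTokenA pvFuzzyKeywordsA
        simp only [List.foldl_cons, List.foldl_nil, hsw', Bool.false_eq_true, if_neg,
          not_false_eq_true]
      rw [hfz]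
      rw [ih _ (i + 1) (by omega) (fun j _hj1 hj2 => by
        rcases Nat.lt_or_ge j i with hji | hji
        · exact hpre j hji hj2
        · have : j = i := by omega
          subst this; exact hsw')]
      rw [hdropi, List.take_add_one, List.getElem?_eq_getElem hi]
      simp only [List.map_cons, Option.toList_some, List.append_assoc, List.singleton_append]
      rw [pvPub_fixed hsw']

theorem pvFuzz_eq_map (ts : List String) : pvFuzzLoopA ts 0 = ts.map pvPub := by
  have := pvFuzzLoopA_eq ts.length ts 0 (by simp) (by intro j hj; omega)
  simpa using this


theorem pvContains_set_ne {ts : List String} {j : Nat} {a v c : String}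
    (hj : ts[j]? = some a) (ha : a ≠ c) (hv : v ≠ c) :
    (ts.set j v).contains c = ts.contains c := by
  have h := pvMem_set_ne hj ha hv
  by_cases hc : c ∈ ts
  · simp [hc, h.mpr hc]
  · have hc2 : c ∉ ts.set j v := fun hx => hc (h.mp hx)
    simp [hc, hc2]

-- A's keyword fold on an already-fuzzed list: the fuzz factors out
theorem pvFoldA_map_pub : ∀ (kws : List (String × String)) (ts : List String), pvOK kws →
    kws.foldl pvStepA (ts.map pvPub) = (kws.foldl pvStepK ts).map pvPub := by
  intro kws
  induction kws with
  | nil => intro ts _; simp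
  | cons kv rest ih =>
    intro ts hok
    obtain ⟨hs1, hs1c, hs2, hs2c, hcv, hcvc⟩ := hok.2.1 kv (List.mem_cons_self ..)
    have hrest := pvOK_cons hok
    have hidx : PySem.List.index? (ts.map pvPub) kv.1 = PySem.List.index? ts kv.1 :=
      pvIndex?_map (pvPub_fix_iff hs1 hcv)
    have hidxc : PySem.List.index? (ts.map pvPub) (kv.1 ++ ",") = PySem.List.index? ts (kv.1 ++ ",") :=
      pvIndex?_map (pvPub_fix_iff hs1c hcvc)
    simp only [List.foldl_cons]
    cases h1 : PySem.List.index? ts kv.1 with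
    | some j =>
      have hmem : kv.1 ∈ ts.map pvPub := by
        rw [← PySem.List.index?_isSome_iff, hidx, h1]; rfl
      have hstepA : pvStepA (ts.map pvPub) kv = (ts.map pvPub).set j kv.2 := by
        unfold pvStepA; rw [if_pos hmem, hidx, h1]
      have hstepK : pvStepK ts kv = ts.set j kv.2 := by unfold pvStepK; rw [h1]
      have hcomm : (ts.map pvPub).set j kv.2 = (ts.set j kv.2).map pvPub := by
        rw [List.map_set, pvPub_fixed hs2]
      rw [hstepA, hstepK, hcomm]
      exact ih _ hrest
    | none =>
      have hnmem : kv.1 ∉ ts.map pvPub := by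
        rw [← PySem.List.index?_isSome_iff, hidx, h1]; simp
      cases h2 : PySem.List.index? ts (kv.1 ++ ",") with
      | some j =>
        have hmemc : (kv.1 ++ ",") ∈ ts.map pvPub := by
          rw [← PySem.List.index?_isSome_iff, hidxc, h2]; rfl
        have hstepA : pvStepA (ts.map pvPub) kv = (ts.map pvPub).set j (kv.2 ++ ",") := by
          unfold pvStepA; rw [if_neg hnmem, if_pos hmemc, hidxc, h2]
        have hstepK : pvStepK ts kv = ts.set j (kv.2 ++ ",") := by unfold pvStepK; rw [h1, h2]
        have hcomm : (ts.map pvPub).set j (kv.2 ++ ",") = (ts.set j (kv.2 ++ ",")).map pvPub := by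
          rw [List.map_set, pvPub_fixed hs2c]
        rw [hstepA, hstepK, hcomm]
        exact ih _ hrest
      | none =>
        have hnmemc : (kv.1 ++ ",") ∉ ts.map pvPub := by
          rw [← PySem.List.index?_isSome_iff, hidxc, h2]; simp
        have hstepA : pvStepA (ts.map pvPub) kv = ts.map pvPub := by
          unfold pvStepA
          rw [if_neg hnmem, if_neg hnmemc, pvFuzz_eq_map, pvMap_pub_idem]
        have hstepK : pvStepK ts kv = ts := by unfold pvStepK; rw [h1, h2]
        rw [hstepA, hstepK]
        exact ih _ hrest

-- LemA: A's interleaved keyword/fuzzy fold = pure keyword fold, fuzz applied iff a keyword is missing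
theorem pvFoldA_eq : ∀ (kws : List (String × String)) (ts : List String), pvOK kws →
    kws.foldl pvStepA ts =
      if pvMissing kws ts then (kws.foldl pvStepK ts).map pvPub else kws.foldl pvStepK ts := by
  intro kws
  induction kws with
  | nil => intro ts _; simp [pvMissing]
  | cons kv rest ih =>
    intro ts hok
    have hrest := pvOK_cons hok
    have hpair := (List.pairwise_cons.mp hok.1).1
    have hok2 : ∀ kv' ∈ rest, pvOK2 kv kv' := fun kv' h =>
      hok.2.2 kv (List.mem_cons_self ..) kv' (List.mem_cons_of_mem _ h)
    have hok2' : ∀ kv' ∈ rest, pvOK2 kv' kv := fun kv' h =>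
      hok.2.2 kv' (List.mem_cons_of_mem _ h) kv (List.mem_cons_self ..)
    have hmisscons : pvMissing (kv :: rest) ts =
        ((!ts.contains kv.1 && !ts.contains (kv.1 ++ ",")) || pvMissing rest ts) := by
      simp [pvMissing]
    simp only [List.foldl_cons]
    cases h1 : PySem.List.index? ts kv.1 with
    | some j =>
      obtain ⟨hjlt, hjv, -⟩ := PySem.List.getElem_of_index?_eq_some h1
      have hj? : ts[j]? = some kv.1 := by rw [List.getElem?_eq_getElem hjlt, hjv]
      have hmem : kv.1 ∈ ts := (PySem.List.index?_isSome_iff ts kv.1).mp (by rw [h1]; rfl)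
      have hstepA : pvStepA ts kv = ts.set j kv.2 := by
        unfold pvStepA; rw [if_pos hmem, h1]
      have hstepK : pvStepK ts kv = ts.set j kv.2 := by unfold pvStepK; rw [h1]
      have hmiss : pvMissing rest (ts.set j kv.2) = pvMissing rest ts := by
        unfold pvMissing
        apply PySem.List.any_congr_mem
        intro kv' hkv'
        obtain ⟨ho1, ho2, ho3, ho4, ho5⟩ := hok2 kv' hkv'
        have e1 := pvContains_set_ne hj? (hpair kv' hkv').1 ho2
        have e2 := pvContains_set_ne hj? ho1 ho3
        rw [e1, e2]
      have hheadfalse : (!ts.contains kv.1 && !ts.contains (kv.1 ++ ",")) = false := by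
        have hc : ts.contains kv.1 = true := (List.contains_iff_mem).mpr hmem
        rw [hc]; rfl
      rw [hstepA, hstepK, ih _ hrest, hmiss, hmisscons, hheadfalse, Bool.false_or]
    | none =>
      have hnmem : kv.1 ∉ ts := (PySem.List.index?_eq_none_iff ts kv.1).mp h1
      cases h2 : PySem.List.index? ts (kv.1 ++ ",") with
      | some j =>
        obtain ⟨hjlt, hjv, -⟩ := PySem.List.getElem_of_index?_eq_some h2
        have hj? : ts[j]? = some (kv.1 ++ ",") := by rw [List.getElem?_eq_getElem hjlt, hjv]
        have hmemc : (kv.1 ++ ",") ∈ ts := (PySem.List.index?_isSome_iff ts (kv.1 ++ ",")).mp (by rw [h2]; rfl)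
        have hstepA : pvStepA ts kv = ts.set j (kv.2 ++ ",") := by
          unfold pvStepA; rw [if_neg hnmem, if_pos hmemc, h2]
        have hstepK : pvStepK ts kv = ts.set j (kv.2 ++ ",") := by unfold pvStepK; rw [h1, h2]
        have hmiss : pvMissing rest (ts.set j (kv.2 ++ ",")) = pvMissing rest ts := by
          unfold pvMissing
          apply PySem.List.any_congr_mem
          intro kv' hkv'
          obtain ⟨ho1, ho2, ho3, ho4, ho5⟩ := hok2 kv' hkv'
          have ho1' := (hok2' kv' hkv').1
          have e1 := pvContains_set_ne hj? (fun h => ho1' h.symm) ho4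
          have e2 := pvContains_set_ne hj? (hpair kv' hkv').2 ho5
          rw [e1, e2]
        have hheadfalse : (!ts.contains kv.1 && !ts.contains (kv.1 ++ ",")) = false := by
          have hc : ts.contains (kv.1 ++ ",") = true := (List.contains_iff_mem).mpr hmemc
          rw [hc, Bool.not_true, Bool.and_false]
        rw [hstepA, hstepK, ih _ hrest, hmiss, hmisscons, hheadfalse, Bool.false_or]
      | none =>
        have hnmemc : (kv.1 ++ ",") ∉ ts := (PySem.List.index?_eq_none_iff ts (kv.1 ++ ",")).mp h2
        have hstepA : pvStepA ts kv = ts.map pvPub := by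
          unfold pvStepA; rw [if_neg hnmem, if_neg hnmemc, pvFuzz_eq_map]
        have hstepK : pvStepK ts kv = ts := by unfold pvStepK; rw [h1, h2]
        have hheadtrue : (!ts.contains kv.1 && !ts.contains (kv.1 ++ ",")) = true := by
          have hc1 : ts.contains kv.1 = false :=
            Bool.eq_false_iff.mpr (fun hx => hnmem ((List.contains_iff_mem).mp hx))
          have hc2 : ts.contains (kv.1 ++ ",") = false :=
            Bool.eq_false_iff.mpr (fun hx => hnmemc ((List.contains_iff_mem).mp hx))
          rw [hc1, hc2]; rfl
        rw [hstepA, hstepK, hmisscons, hheadtrue, Bool.true_or, if_pos rfl]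
        exact pvFoldA_map_pub rest ts hrest


-- B1: the first-occurrence dict built by B's single scan
theorem pvDictFold : ∀ (ts : List String) (s : Int) (d : PySem.Dict String Int) (c : String),
    ((PySem.List.enumerate ts s).foldl
        (fun d (p : Int × String) => if d.contains p.2 then d else d.insert p.2 p.1) d).get? c =
      if d.contains c then d.get? c
      else (PySem.List.index? ts c).map (fun n => s + (n : Int)) := by
  intro ts
  induction ts with
  | nil =>
    intro s d c
    rw [PySem.List.enumerate_nil]
    simp only [List.foldl_nil]
    by_cases hc : d.contains c
    · rw [if_pos hc]
    · rw [if_neg hc, (PySem.Dict.get?_eq_none_iff_contains d c).mpr (Bool.eq_false_iff.mpr hc)]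
      rfl
  | cons t tl ih =>
    intro s d c
    rw [PySem.List.enumerate_cons, List.foldl_cons]
    by_cases hdt : d.contains t
    · rw [if_pos hdt, ih]
      by_cases hdc : d.contains c
      · rw [if_pos hdc, if_pos hdc]
      · rw [if_neg hdc, if_neg hdc]
        have hct : t ≠ c := fun h => hdc (h ▸ hdt)
        rw [PySem.List.index?_cons_of_ne _ hct]
        cases PySem.List.index? tl c <;> simp
        omega
    · rw [if_neg hdt, ih]
      by_cases hct : c = t
      · subst hct
        rw [if_pos (PySem.Dict.contains_insert_self d c s), PySem.Dict.get?_insert_self,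
          if_neg hdt, PySem.List.index?_cons_self]
        simp
      · have hins : (d.insert t s).contains c = d.contains c := by
          rw [PySem.Dict.contains_insert]; simp [hct]
        rw [hins]
        by_cases hdc : d.contains c
        · rw [if_pos hdc, if_pos hdc, PySem.Dict.get?_insert_of_ne d s hct]
        · rw [if_neg hdc, if_neg hdc, PySem.List.index?_cons_of_ne _ (fun h => hct h.symm)]
          cases PySem.List.index? tl c <;> simp
          omega

theorem pvScanB_eq (ts : List String) :
    pvScanB ts =
      ((PySem.List.enumerate ts).foldl
          (fun d (p : Int × String) => if d.contains p.2 then d else d.insert p.2 p.1)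
          PySem.Dict.empty,
        (PySem.List.enumerate ts).foldl
          (fun l (p : Int × String) =>
            if PySem.Str.startswith p.2 "public." then l ++ [p.1] else l) []) := by
  unfold pvScanB
  exact PySem.List.foldl_prod_mk
    (fun d (p : Int × String) => if d.contains p.2 then d else d.insert p.2 p.1)
    (fun l (p : Int × String) =>
      if PySem.Str.startswith p.2 "public." then l ++ [p.1] else l)
    (PySem.List.enumerate ts) PySem.Dict.empty []

theorem pvScanB_get? (ts : List String) (c : String) :
    (pvScanB ts).1.get? c = (PySem.List.index? ts c).map (fun n => (n : Int)) := by
  rw [pvScanB_eq]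
  dsimp only
  rw [pvDictFold]
  rw [if_neg (by rw [PySem.Dict.contains_empty]; simp)]
  cases PySem.List.index? ts c <;> simp

theorem pvScanB_fuzzy (ts : List String) :
    (pvScanB ts).2 =
      ((PySem.List.enumerate ts).filter
        (fun p => PySem.Str.startswith p.2 "public.")).map (fun p => p.1) := by
  rw [pvScanB_eq]
  dsimp only
  rw [PySem.List.foldl_append_if (p := fun p : Int × String => PySem.Str.startswith p.2 "public.")
    (f := fun p : Int × String => p.1)]
  rfl

-- S3: B's keyword fold with dict lookups = the reference fold, plus the missing flag
theorem pvFoldB_eq : ∀ (kws : List (String × String)) (ts cur : List String) (b : Bool),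
    pvOK kws →
    (∀ kv ∈ kws, PySem.List.index? cur kv.1 = PySem.List.index? ts kv.1 ∧
        PySem.List.index? cur (kv.1 ++ ",") = PySem.List.index? ts (kv.1 ++ ",")) →
    kws.foldl (pvStepB (pvScanB ts).1) (cur, b) =
      (kws.foldl pvStepK cur, b || pvMissing kws ts) := by
  intro kws
  induction kws with
  | nil => intro ts cur b _ _; simp [pvMissing]
  | cons kv rest ih =>
    intro ts cur b hok hinv
    have hrest := pvOK_cons hok
    have hpair := (List.pairwise_cons.mp hok.1).1
    have hok2 : ∀ kv' ∈ rest, pvOK2 kv kv' := fun kv' h =>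
      hok.2.2 kv (List.mem_cons_self ..) kv' (List.mem_cons_of_mem _ h)
    have hok2' : ∀ kv' ∈ rest, pvOK2 kv' kv := fun kv' h =>
      hok.2.2 kv' (List.mem_cons_of_mem _ h) kv (List.mem_cons_self ..)
    obtain ⟨hH1, hH2⟩ := hinv kv (List.mem_cons_self ..)
    have hmisscons : pvMissing (kv :: rest) ts =
        ((!ts.contains kv.1 && !ts.contains (kv.1 ++ ",")) || pvMissing rest ts) := by
      simp [pvMissing]
    simp only [List.foldl_cons]
    cases h1 : PySem.List.index? ts kv.1 with
    | some n =>
      have hget : (pvScanB ts).1.get? kv.1 = some (n : Int) := by rw [pvScanB_get?, h1]; rfl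
      have hcur1 : PySem.List.index? cur kv.1 = some n := by rw [hH1, h1]
      obtain ⟨hnlt, hnv, -⟩ := PySem.List.getElem_of_index?_eq_some hcur1
      have hn? : cur[n]? = some kv.1 := by rw [List.getElem?_eq_getElem hnlt, hnv]
      have hstepB : pvStepB (pvScanB ts).1 (cur, b) kv = (cur.set n kv.2, b) := by
        unfold pvStepB; rw [hget]
        simp [PySem.List.pySetD_natCast]
      have hstepK : pvStepK cur kv = cur.set n kv.2 := by unfold pvStepK; rw [hcur1]
      have hinv' : ∀ kv' ∈ rest,
          PySem.List.index? (cur.set n kv.2) kv'.1 = PySem.List.index? ts kv'.1 ∧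
          PySem.List.index? (cur.set n kv.2) (kv'.1 ++ ",") =
            PySem.List.index? ts (kv'.1 ++ ",") := by
        intro kv' hkv'
        obtain ⟨ho1, ho2, ho3, ho4, ho5⟩ := hok2 kv' hkv'
        obtain ⟨hi1, hi2⟩ := hinv kv' (List.mem_cons_of_mem _ hkv')
        exact ⟨by rw [pvIndex?_set_ne hn? (hpair kv' hkv').1 ho2, hi1],
          by rw [pvIndex?_set_ne hn? ho1 ho3, hi2]⟩
      have hmem : kv.1 ∈ ts :=
        (PySem.List.index?_isSome_iff ts kv.1).mp (by rw [h1]; rfl)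
      have hheadfalse : (!ts.contains kv.1 && !ts.contains (kv.1 ++ ",")) = false := by
        have hc : ts.contains kv.1 = true := (List.contains_iff_mem).mpr hmem
        rw [hc]; rfl
      rw [hstepB, hstepK, ih ts _ b hrest hinv', hmisscons, hheadfalse, Bool.false_or]
    | none =>
      cases h2 : PySem.List.index? ts (kv.1 ++ ",") with
      | some n =>
        have hget : (pvScanB ts).1.get? kv.1 = none := by rw [pvScanB_get?, h1]; rfl
        have hgetc : (pvScanB ts).1.get? (kv.1 ++ ",") = some (n : Int) := by
          rw [pvScanB_get?, h2]; rfl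
        have hcurc : PySem.List.index? cur (kv.1 ++ ",") = some n := by rw [hH2, h2]
        obtain ⟨hnlt, hnv, -⟩ := PySem.List.getElem_of_index?_eq_some hcurc
        have hn? : cur[n]? = some (kv.1 ++ ",") := by rw [List.getElem?_eq_getElem hnlt, hnv]
        have hstepB : pvStepB (pvScanB ts).1 (cur, b) kv = (cur.set n (kv.2 ++ ","), b) := by
          unfold pvStepB; rw [hget, hgetc]
          simp [PySem.List.pySetD_natCast]
        have hstepK : pvStepK cur kv = cur.set n (kv.2 ++ ",") := by
          unfold pvStepK; rw [hH1, h1, hcurc]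
        have hinv' : ∀ kv' ∈ rest,
            PySem.List.index? (cur.set n (kv.2 ++ ",")) kv'.1 = PySem.List.index? ts kv'.1 ∧
            PySem.List.index? (cur.set n (kv.2 ++ ",")) (kv'.1 ++ ",") =
              PySem.List.index? ts (kv'.1 ++ ",") := by
          intro kv' hkv'
          obtain ⟨ho1, ho2, ho3, ho4, ho5⟩ := hok2 kv' hkv'
          have ho1' := (hok2' kv' hkv').1
          obtain ⟨hi1, hi2⟩ := hinv kv' (List.mem_cons_of_mem _ hkv')
          exact ⟨by rw [pvIndex?_set_ne hn? (fun h => ho1' h.symm) ho4, hi1],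
            by rw [pvIndex?_set_ne hn? (hpair kv' hkv').2 ho5, hi2]⟩
        have hmemc : (kv.1 ++ ",") ∈ ts :=
          (PySem.List.index?_isSome_iff ts (kv.1 ++ ",")).mp (by rw [h2]; rfl)
        have hheadfalse : (!ts.contains kv.1 && !ts.contains (kv.1 ++ ",")) = false := by
          have hc : ts.contains (kv.1 ++ ",") = true := (List.contains_iff_mem).mpr hmemc
          rw [hc, Bool.not_true, Bool.and_false]
        rw [hstepB, hstepK, ih ts _ b hrest hinv', hmisscons, hheadfalse, Bool.false_or]
      | none =>
        have hget : (pvScanB ts).1.get? kv.1 = none := by rw [pvScanB_get?, h1]; rfl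
        have hgetc : (pvScanB ts).1.get? (kv.1 ++ ",") = none := by rw [pvScanB_get?, h2]; rfl
        have hstepB : pvStepB (pvScanB ts).1 (cur, b) kv = (cur, true) := by
          unfold pvStepB; rw [hget, hgetc]
        have hstepK : pvStepK cur kv = cur := by unfold pvStepK; rw [hH1, h1, hH2, h2]
        have hinv' : ∀ kv' ∈ rest, _ ∧ _ := fun kv' h => hinv kv' (List.mem_cons_of_mem _ h)
        have hnmem : kv.1 ∉ ts := (PySem.List.index?_eq_none_iff ts kv.1).mp h1
        have hnmemc : (kv.1 ++ ",") ∉ ts :=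
          (PySem.List.index?_eq_none_iff ts (kv.1 ++ ",")).mp h2
        have hheadtrue : (!ts.contains kv.1 && !ts.contains (kv.1 ++ ",")) = true := by
          have hc1 : ts.contains kv.1 = false :=
            Bool.eq_false_iff.mpr (fun hx => hnmem ((List.contains_iff_mem).mp hx))
          have hc2 : ts.contains (kv.1 ++ ",") = false :=
            Bool.eq_false_iff.mpr (fun hx => hnmemc ((List.contains_iff_mem).mp hx))
          rw [hc1, hc2]; rfl
        rw [hstepB, hstepK, ih ts cur true hrest hinv', hmisscons, hheadtrue]
        simp

-- S4a: the keyword fold preserves length and the 'public.'-prefix flag of every position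
theorem pvStepK_length (ts : List String) (kv : String × String) :
    (pvStepK ts kv).length = ts.length := by
  unfold pvStepK
  cases PySem.List.index? ts kv.1 with
  | some j => simp
  | none =>
    cases PySem.List.index? ts (kv.1 ++ ",") with
    | some j => simp
    | none => rfl

theorem pvStepK_flag (ts : List String) (kv : String × String) (h : pvOK1 kv) (k : Nat) :
    ((pvStepK ts kv)[k]?).map (fun t => PySem.Str.startswith t "public.") =
      (ts[k]?).map (fun t => PySem.Str.startswith t "public.") := by
  obtain ⟨hs1, hs1c, hs2, hs2c, -, -⟩ := h
  unfold pvStepK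
  cases h1 : PySem.List.index? ts kv.1 with
  | some j =>
    obtain ⟨hjlt, hjv, -⟩ := PySem.List.getElem_of_index?_eq_some h1
    by_cases hk : j = k
    · subst hk
      rw [List.getElem?_set_self hjlt, List.getElem?_eq_getElem hjlt, hjv]
      simp only [Option.map_some]
      rw [hs2, hs1]
    · rw [List.getElem?_set_ne hk]
  | none =>
    cases h2 : PySem.List.index? ts (kv.1 ++ ",") with
    | some j =>
      obtain ⟨hjlt, hjv, -⟩ := PySem.List.getElem_of_index?_eq_some h2
      by_cases hk : j = k
      · subst hk
        rw [List.getElem?_set_self hjlt, List.getElem?_eq_getElem hjlt, hjv]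
        simp only [Option.map_some]
        rw [hs2c, hs1c]
      · rw [List.getElem?_set_ne hk]
    | none => rfl

theorem pvFoldK_length : ∀ (kws : List (String × String)) (ts : List String),
    (kws.foldl pvStepK ts).length = ts.length := by
  intro kws
  induction kws with
  | nil => intro ts; rfl
  | cons kv rest ih =>
    intro ts
    rw [List.foldl_cons, ih, pvStepK_length]

theorem pvFoldK_flag : ∀ (kws : List (String × String)) (ts : List String),
    (∀ kv ∈ kws, pvOK1 kv) → ∀ k : Nat,
    ((kws.foldl pvStepK ts)[k]?).map (fun t => PySem.Str.startswith t "public.") =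
      (ts[k]?).map (fun t => PySem.Str.startswith t "public.") := by
  intro kws
  induction kws with
  | nil => intro ts _ k; rfl
  | cons kv rest ih =>
    intro ts h1 k
    rw [List.foldl_cons, ih _ (fun a ha => h1 a (List.mem_cons_of_mem _ ha)),
      pvStepK_flag ts kv (h1 kv (List.mem_cons_self ..))]

-- S4b: applying the collected fuzzy positions pointwise
theorem pvSetsFold : ∀ (fz : List Int) (ts : List String),
    (∀ i ∈ fz, ∃ k : Nat, i = (k : Int) ∧ k < ts.length) →
    ∀ k : Nat,
      (fz.foldl (fun ts i => PySem.List.pySetD ts i "character varying") ts)[k]? =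
        if (k : Int) ∈ fz then some "character varying" else ts[k]? := by
  intro fz
  induction fz with
  | nil => intro ts _ k; simp
  | cons i rest ih =>
    intro ts hval k
    obtain ⟨k0, hik, hk0⟩ := hval i (List.mem_cons_self ..)
    subst hik
    simp only [List.foldl_cons, PySem.List.pySetD_natCast]
    rw [ih (ts.set k0 "character varying") (fun j hj => by
      obtain ⟨k1, h1, h2⟩ := hval j (List.mem_cons_of_mem _ hj)
      exact ⟨k1, h1, by simpa using h2⟩)]
    by_cases hkr : (k : Int) ∈ rest
    · rw [if_pos hkr, if_pos (List.mem_cons_of_mem _ hkr)]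
    · rw [if_neg hkr]
      by_cases hkk : k = k0
      · subst hkk
        rw [List.getElem?_set_self hk0, if_pos (List.mem_cons_self ..)]
      · rw [List.getElem?_set_ne (fun h => hkk h.symm),
          if_neg (by
            intro hm
            rcases List.mem_cons.mp hm with h | h
            · exact hkk (by exact_mod_cast h)
            · exact hkr h)]

-- S4c: B's fuzzy pass over precomputed positions = map pvPub over the keyword-folded list
theorem pvFuzzyApply (kws : List (String × String)) (ts : List String) (hok : pvOK kws) :
    (pvScanB ts).2.foldl (fun ts i => PySem.List.pySetD ts i "character varying")
        (kws.foldl pvStepK ts) = (kws.foldl pvStepK ts).map pvPub := by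
  have hlen : (kws.foldl pvStepK ts).length = ts.length := pvFoldK_length kws ts
  have hflag := pvFoldK_flag kws ts hok.2.1
  have hfz := pvScanB_fuzzy ts
  have hmem : ∀ k : Nat, ((k : Int) ∈ (pvScanB ts).2) ↔
      (∃ hk : k < ts.length, PySem.Str.startswith (ts[k]'hk) "public." = true) := by
    intro k
    rw [hfz]
    constructor
    · intro hm
      obtain ⟨p, hp, hpk⟩ := List.mem_map.mp hm
      have hpf := List.mem_filter.mp hp
      obtain ⟨k', hk', hpe⟩ := (PySem.List.mem_enumerate_iff ts 0 p).mp hpf.1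
      have hkk : k' = k := by
        have : p.1 = (k : Int) := hpk
        rw [hpe] at this
        simpa using this
      subst hkk
      refine ⟨hk', ?_⟩
      have := hpf.2
      rw [hpe] at this
      exact this
    · rintro ⟨hk, hf⟩
      exact List.mem_map.mpr ⟨((k : Int), ts[k]'hk),
        List.mem_filter.mpr ⟨(PySem.List.mem_enumerate_iff ts 0 _).mpr ⟨k, hk, by simp⟩, hf⟩, rfl⟩
  have hvalid : ∀ i ∈ (pvScanB ts).2, ∃ k : Nat, i = (k : Int) ∧ k < (kws.foldl pvStepK ts).length := by
    intro i hi
    rw [hfz] at hi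
    obtain ⟨p, hp, hpk⟩ := List.mem_map.mp hi
    obtain ⟨k', hk', hpe⟩ := (PySem.List.mem_enumerate_iff ts 0 p).mp (List.mem_filter.mp hp).1
    refine ⟨k', ?_, by omega⟩
    rw [← hpk, hpe]
    simp
  apply List.ext_getElem?
  intro k
  rw [pvSetsFold _ _ hvalid k, List.getElem?_map]
  by_cases hm : (k : Int) ∈ (pvScanB ts).2
  · rw [if_pos hm]
    obtain ⟨hk, hf⟩ := (hmem k).mp hm
    have hk1 : k < (kws.foldl pvStepK ts).length := by omega
    have hflagk := hflag k
    rw [List.getElem?_eq_getElem hk1, List.getElem?_eq_getElem hk] at hflagk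
    simp only [Option.map_some, Option.some.injEq] at hflagk
    rw [List.getElem?_eq_getElem hk1]
    have hft : PySem.Str.startswith ((kws.foldl pvStepK ts)[k]'hk1) "public." = true := by
      rw [hflagk]; exact hf
    simp only [Option.map_some]
    unfold pvPub
    rw [hft]
    simp
  · rw [if_neg hm]
    by_cases hk : k < ts.length
    · have hk1 : k < (kws.foldl pvStepK ts).length := by omega
      have hflagk := hflag k
      rw [List.getElem?_eq_getElem hk1, List.getElem?_eq_getElem hk] at hflagk
      simp only [Option.map_some, Option.some.injEq] at hflagk
      have hff : PySem.Str.startswith ((kws.foldl pvStepK ts)[k]'hk1) "public." = false := by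
        cases hcase : PySem.Str.startswith (ts[k]'hk) "public."
        · rw [hflagk]; exact hcase
        · exact absurd ((hmem k).mpr ⟨hk, hcase⟩) hm
      rw [List.getElem?_eq_getElem hk1]
      simp only [Option.map_some]
      unfold pvPub
      rw [hff]
      simp
    · rw [List.getElem?_eq_none (by omega)]
      rfl

-- the two per-line functions agree
theorem pvKeywordsB_eq : pvKeywordsB = pvKeywordsA := rfl

theorem pvLine_eq (line : String) : pvLineA line = pvLineB line := by
  unfold pvLineA pvLineB
  cases h : PySem.Str.split? line " " with
  | none => rfl
  | some tokens =>
    dsimp only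
    congr 1
    have hok := pvOK_keywords
    have hB := pvFoldB_eq pvKeywordsA tokens tokens false hok (fun kv _ => ⟨rfl, rfl⟩)
    rw [pvKeywordsB_eq, hB, pvFoldA_eq _ _ hok]
    dsimp only
    rw [Bool.false_or]
    by_cases hm : pvMissing pvKeywordsA tokens
    · rw [if_pos hm, if_pos hm]
      exact (pvFuzzyApply pvKeywordsA tokens hok).symm
    · rw [if_neg hm, if_neg hm]

-- ===== VERDICT (by name: the statement is the Claim_ definition above) =====
set_option maxHeartbeats 1000000 in
theorem replace_keyword_spec : Claim_equal_replace_keyword := by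
  intro stmts _
  unfold Spec_replace_keyword replace_keyword replace_keyword_alt
  apply List.map_congr_left
  intro stmt _
  cases PySem.Str.split? stmt "\n" with
  | none => rfl
  | some lines =>
    show PySem.Str.join "\n" (lines.map pvLineA) = PySem.Str.join "\n" (lines.map pvLineB)
    exact congrArg _ (List.map_congr_left (fun line _ => pvLine_eq line))
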